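-- pv_equiv track=rewrite | github.com/nathan29849/TIL | 03_Python/Study/03_Python/Study/정렬/수묶기_withList.py | solution
-- ===== SOURCE A (Python) =====
-- def solution(n, arr):
--     answer = 0
--     arr.sort(reverse=True)  # 내림차순 정렬
--     plus = []
--     one = []
--     zero = []
--     minus = []
--     for x in arr:
--         if x > 1:
--             plus.append(x)
--         elif x == 1:
--             one.append(x)
--         elif x == 0:
--             zero.append(x)
--         else:
--             minus.append(x)
--
--     if len(plus) % 2 == 0:
--         for i in range(0, len(plus), 2):
--             answer += plus[i] * plus[i+1]
--     else:
--         for i in range(0, len(plus)-1, 2):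
--             answer += plus[i] * plus[i+1]
--         answer += plus[-1]
--
--     answer += len(one)
--
--     minus.sort()
--     if len(minus) % 2 == 0:
--         for i in range(0, len(minus), 2):
--             answer += minus[i] * minus[i+1]
--     else:
--         for i in range(0, len(minus)-1, 2):
--             answer += minus[i] * minus[i+1]
--
--         if len(zero) == 0:
--             answer += minus[-1]
--
--     return answer
-- ===== SOURCE B (Python) =====
-- # B: two pointers on the one descending-sorted list (no bucket lists, no second
-- # sort): a head pointer pairs leading >1 values, a tail pointer pairs the two
-- # most-negative values from the end, and the untouched middle slice yields the
-- # count of ones and the lone-leftover-negative / zero-absorption rule.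
-- # Like A it sorts arr in place (descending); equivalence is about the return value.
--
-- def solution(n, arr):
--     arr.sort(reverse=True)
--     ans = 0
--     i, j = 0, len(arr) - 1
--     # head: pair the two largest values while the second of the pair is > 1
--     while i + 1 <= j and arr[i + 1] > 1:
--         ans += arr[i] * arr[i + 1]
--         i += 2
--     # a single leftover value > 1 is taken alone
--     if i <= j and arr[i] > 1:
--         ans += arr[i]
--         i += 1
--     # tail: pair the two most negative values from the end
--     while j - 1 >= i and arr[j - 1] < 0:
--         ans += arr[j] * arr[j - 1]
--         j -= 2
--     # middle: ones, zeros and possibly one leftover negative (still descending)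
--     mid = arr[i:j + 1]
--     ans += mid.count(1)
--     if mid and mid[-1] < 0 and 0 not in mid:
--         ans += mid[-1]
--     return ans
-- ===== Notes on version B (the rewrite author's own statement) =====
-- stated objective: alternative
-- what changed: B replaces A's four bucket lists, four index loops and the second sort of the negatives by a head/tail two-pointer sweep over the single descending-sorted list: the head pointer pairs leading >1 values, the tail pointer pairs the two most-negative values from the end, and the untouched middle slice gives the count of ones and the lone-negative/zero-absorption rule.
import Mathlib
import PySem

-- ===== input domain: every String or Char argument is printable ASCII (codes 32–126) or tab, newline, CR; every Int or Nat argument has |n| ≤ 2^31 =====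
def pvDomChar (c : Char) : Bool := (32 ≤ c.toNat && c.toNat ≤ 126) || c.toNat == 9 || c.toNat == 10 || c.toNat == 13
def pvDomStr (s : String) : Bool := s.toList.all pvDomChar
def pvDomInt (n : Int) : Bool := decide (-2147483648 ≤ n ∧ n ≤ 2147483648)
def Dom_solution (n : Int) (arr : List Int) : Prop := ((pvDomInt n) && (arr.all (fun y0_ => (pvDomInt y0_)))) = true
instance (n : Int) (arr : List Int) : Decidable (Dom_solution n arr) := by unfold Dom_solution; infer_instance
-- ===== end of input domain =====

-- B replaces A's four bucket lists, four index loops and second sort by a head/tail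
-- two-pointer sweep over the one descending-sorted list (objective: alternative).
-- Both A and B sort arr in place (descending) in Python; the equivalence proved
-- here is about the return value.

-- ===== PORT A =====
def solution (n : Int) (arr : List Int) : Int :=
  let arr := PySem.List.sorted arr (fun x => x) true      -- arr.sort(reverse=True)
  let buckets := arr.foldl
    (fun (acc : List Int × List Int × List Int × List Int) x =>
      match acc with
      | (plus, one, zero, minus) =>
        if x > 1 then (plus ++ [x], one, zero, minus)
        else if x = 1 then (plus, one ++ [x], zero, minus)
        else if x = 0 then (plus, one, zero ++ [x], minus)
        else (plus, one, zero, minus ++ [x]))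
    ([], [], [], [])
  let plus := buckets.1
  let one := buckets.2.1
  let zero := buckets.2.2.1
  let minus := buckets.2.2.2
  let answer : Int := 0
  let answer :=
    if plus.length % 2 = 0 then
      (PySem.List.pyRange 0 (plus.length : Int) 2).foldl
        (fun a i => a + PySem.List.pyGetD plus i 0 * PySem.List.pyGetD plus (i + 1) 0) answer
    else
      let answer :=
        (PySem.List.pyRange 0 ((plus.length : Int) - 1) 2).foldl
          (fun a i => a + PySem.List.pyGetD plus i 0 * PySem.List.pyGetD plus (i + 1) 0) answer
      answer + PySem.List.pyGetD plus (-1) 0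
  let answer := answer + (one.length : Int)
  let minus := PySem.List.sorted minus (fun x => x) false  -- minus.sort()
  let answer :=
    if minus.length % 2 = 0 then
      (PySem.List.pyRange 0 (minus.length : Int) 2).foldl
        (fun a i => a + PySem.List.pyGetD minus i 0 * PySem.List.pyGetD minus (i + 1) 0) answer
    else
      let answer :=
        (PySem.List.pyRange 0 ((minus.length : Int) - 1) 2).foldl
          (fun a i => a + PySem.List.pyGetD minus i 0 * PySem.List.pyGetD minus (i + 1) 0) answer
      if zero.length = 0 then answer + PySem.List.pyGetD minus (-1) 0 else answer
  answer

-- ===== PORT B =====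
-- the head while loop: pair the two largest values while the second of the pair is > 1
def headLoop (a : List Int) (j : Int) (i : Int) (ans : Int) : Int × Int :=
  if _h : i + 1 ≤ j ∧ PySem.List.pyGetD a (i + 1) 0 > 1 then
    headLoop a j (i + 2) (ans + PySem.List.pyGetD a i 0 * PySem.List.pyGetD a (i + 1) 0)
  else (i, ans)
termination_by (j + 1 - i).toNat
decreasing_by omega

-- the tail while loop: pair the two most negative values from the end
def tailLoop (a : List Int) (i : Int) (j : Int) (ans : Int) : Int × Int :=
  if _h : j - 1 ≥ i ∧ PySem.List.pyGetD a (j - 1) 0 < 0 then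
    tailLoop a i (j - 2) (ans + PySem.List.pyGetD a j 0 * PySem.List.pyGetD a (j - 1) 0)
  else (j, ans)
termination_by (j + 1 - i).toNat
decreasing_by omega

def solution_alt (n : Int) (arr : List Int) : Int :=
  let a := PySem.List.sorted arr (fun x => x) true        -- arr.sort(reverse=True)
  let j0 : Int := (a.length : Int) - 1                    -- i, j = 0, len(arr) - 1
  let hi := headLoop a j0 0 0
  let hi :=                                               -- lone leftover value > 1
    if hi.1 ≤ j0 ∧ PySem.List.pyGetD a hi.1 0 > 1 then
      (hi.1 + 1, hi.2 + PySem.List.pyGetD a hi.1 0)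
    else hi
  let tj := tailLoop a hi.1 j0 hi.2
  let mid := PySem.List.slice a (some hi.1) (some (tj.1 + 1))   -- arr[i:j+1]
  let ans := tj.2 + (PySem.List.count mid 1 : Int)        -- mid.count(1)
  if mid ≠ [] ∧ PySem.List.pyGetD mid (-1) 0 < 0 ∧ ¬ (0 ∈ mid) then
    ans + PySem.List.pyGetD mid (-1) 0
  else ans

-- ===== PRECONDITION & SPEC =====
def Spec_solution (n : Int) (arr : List Int) (out : Int) : Prop := out = solution_alt n arr
instance (n : Int) (arr : List Int) (out : Int) : Decidable (Spec_solution n arr out) := by unfold Spec_solution; infer_instance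

-- ===== CLAIM =====
def Claim_equal_solution : Prop := ∀ (n : Int) (arr : List Int), Dom_solution n arr → Spec_solution n arr (solution n arr)

-- ===== LEMMAS AND PROOFS =====

def pairSum : List Int → Int
  | a :: b :: t => a * b + pairSum t
  | _ => 0

def oddTail (l : List Int) : Int := if l.length % 2 = 1 then l.getLastD 0 else 0

lemma pairSum_take_of_le : ∀ (k : Nat) (l : List Int), l.length ≤ 2 * k + 1 →
    pairSum (l.take (2 * k)) = pairSum l := by
  intro k
  induction k with
  | zero =>
    intro l h
    match l, h with
    | [], _ => rfl
    | [a], _ => rfl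
  | succ k ih =>
    intro l h
    match l with
    | [] => rfl
    | [a] => simp [List.take]
    | a :: b :: t =>
      have h2 : 2 * (k + 1) = 2 * k + 1 + 1 := by ring
      rw [h2, List.take_succ_cons, List.take_succ_cons]
      rw [show pairSum (a :: b :: t.take (2 * k)) = a * b + pairSum (t.take (2 * k)) from rfl,
          show pairSum (a :: b :: t) = a * b + pairSum t from rfl,
          ih t (by simp at h ⊢; omega)]

lemma foldl_pairs : ∀ (k : Nat) (l : List Int) (init : Int), 2 * k ≤ l.length →
    (List.range k).foldl (fun a j => a + l.getD (2 * j) 0 * l.getD (2 * j + 1) 0) init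
      = init + pairSum (l.take (2 * k)) := by
  intro k
  induction k with
  | zero => intro l init h; simp [pairSum]
  | succ k ih =>
    intro l init h
    match l with
    | a :: b :: t =>
      have hf : (fun (acc : Int) (j : Nat) =>
            acc + (a :: b :: t).getD (2 * Nat.succ j) 0 * (a :: b :: t).getD (2 * Nat.succ j + 1) 0)
          = fun acc j => acc + t.getD (2 * j) 0 * t.getD (2 * j + 1) 0 := by
        funext acc j
        have e1 : 2 * Nat.succ j = 2 * j + 1 + 1 := by omega
        rw [e1]; simp
      simp only [List.range_succ_eq_map, List.foldl_cons, List.foldl_map]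
      rw [hf]
      rw [ih t (init + (a :: b :: t).getD (2*0) 0 * (a :: b :: t).getD (2*0+1) 0) (by simp at h ⊢; omega)]
      have h2 : 2 * (k + 1) = 2 * k + 1 + 1 := by ring
      rw [h2, List.take_succ_cons, List.take_succ_cons]
      show _ = init + pairSum (a :: b :: t.take (2*k))
      rw [show pairSum (a :: b :: t.take (2*k)) = a * b + pairSum (t.take (2*k)) from rfl]
      simp; ring

lemma A_loop_gen (l : List Int) (init : Int) (b : Int) (m : Nat)
    (hN : (if (0:Int) < b then ((b - 0 + 2 - 1) / 2).toNat else 0) = m) (hm : 2 * m ≤ l.length) :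
    (PySem.List.pyRange 0 b 2).foldl
        (fun a i => a + PySem.List.pyGetD l i 0 * PySem.List.pyGetD l (i + 1) 0) init
      = init + pairSum (l.take (2 * m)) := by
  rw [PySem.List.pyRange_of_pos 0 b (by norm_num)]
  simp only [List.foldl_map]
  have hf : (fun (acc : Int) (k : Nat) =>
        acc + PySem.List.pyGetD l (0 + 2 * (k:Int)) 0 * PySem.List.pyGetD l (0 + 2 * (k:Int) + 1) 0)
      = fun acc k => acc + l.getD (2 * k) 0 * l.getD (2 * k + 1) 0 := by
    funext acc k
    have e1 : (0 + 2 * (k:Int)) = ((2 * k : Nat) : Int) := by push_cast; ring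
    have e2 : (0 + 2 * (k:Int) + 1) = ((2 * k + 1 : Nat) : Int) := by push_cast; ring
    rw [e1]
    have e3 : ((2 * k : Nat) : Int) + 1 = ((2 * k + 1 : Nat) : Int) := by push_cast; ring
    rw [e3, PySem.List.pyGetD_natCast, PySem.List.pyGetD_natCast]
  rw [hf]
  rw [show (if (0:Int) < b then ((b - 0 + 2 - 1) / 2).toNat else 0) = m from hN]
  exact foldl_pairs m l init hm

lemma A_loop_even (l : List Int) (init : Int) (h : l.length % 2 = 0) :
    (PySem.List.pyRange 0 (l.length : Int) 2).foldl
        (fun a i => a + PySem.List.pyGetD l i 0 * PySem.List.pyGetD l (i + 1) 0) init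
      = init + pairSum l := by
  have := A_loop_gen l init (l.length : Int) (l.length / 2) (by split_ifs <;> omega) (by omega)
  rwa [show 2 * (l.length / 2) = l.length by omega, List.take_length] at this

lemma A_loop_odd (l : List Int) (init : Int) (h : l.length % 2 = 1) :
    (PySem.List.pyRange 0 ((l.length : Int) - 1) 2).foldl
        (fun a i => a + PySem.List.pyGetD l i 0 * PySem.List.pyGetD l (i + 1) 0) init
      = init + pairSum l := by
  have := A_loop_gen l init ((l.length : Int) - 1) (l.length / 2) (by split_ifs <;> omega) (by omega)
  rwa [pairSum_take_of_le (l.length / 2) l (by omega)] at this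

lemma buckets_eq : ∀ (s : List Int) (p o z m : List Int),
    s.foldl (fun (acc : List Int × List Int × List Int × List Int) x =>
        match acc with
        | (plus, one, zero, minus) =>
          if x > 1 then (plus ++ [x], one, zero, minus)
          else if x = 1 then (plus, one ++ [x], zero, minus)
          else if x = 0 then (plus, one, zero ++ [x], minus)
          else (plus, one, zero, minus ++ [x])) (p, o, z, m)
    = (p ++ s.filter (fun x => decide (x > 1)), o ++ s.filter (fun x => decide (x = 1)),
       z ++ s.filter (fun x => decide (x = 0)), m ++ s.filter (fun x => decide (x < 0))) := by
  intro s
  induction s with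
  | nil => intro p o z m; simp
  | cons x t ih =>
    intro p o z m
    rw [List.foldl_cons]
    by_cases h1 : x > 1
    · simp only [if_pos h1]
      rw [ih]
      simp [h1, show ¬(x = 1) by omega, show ¬(x = 0) by omega, show ¬(x < 0) by omega]
    · by_cases h2 : x = 1
      · simp only [if_neg h1, if_pos h2]
        rw [ih]
        simp [h2]
      · by_cases h3 : x = 0
        · simp only [if_neg h1, if_neg h2, if_pos h3]
          rw [ih]
          simp [h3]
        · simp only [if_neg h1, if_neg h2, if_neg h3]
          rw [ih]
          simp [h1, h2, h3, show x < 0 by omega]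

-- a sorted-descending list is its >1, =1, =0, <0 filters in that order
lemma sorted_split : ∀ (s : List Int), s.Pairwise (fun a b => b ≤ a) →
    s = s.filter (fun x => decide (x > 1)) ++ s.filter (fun x => decide (x = 1))
        ++ s.filter (fun x => decide (x = 0)) ++ s.filter (fun x => decide (x < 0)) := by
  intro s
  induction s with
  | nil => intro _; simp
  | cons x t ih =>
    intro hs
    have ht : ∀ y ∈ t, y ≤ x := (List.pairwise_cons.1 hs).1
    have hts := (List.pairwise_cons.1 hs).2
    have htrec := ih hts
    by_cases h1 : x > 1
    · simp only [List.filter_cons, decide_eq_true_eq]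
      rw [if_pos h1, if_neg (by omega), if_neg (by omega), if_neg (by omega)]
      simpa using htrec
    · by_cases h2 : x = 1
      · have e1 : t.filter (fun x => decide (x > 1)) = [] := by
          rw [List.filter_eq_nil_iff]; intro y hy; have := ht y hy; simp; omega
        have e0 : (x :: t).filter (fun x => decide (x > 1)) = [] := by
          simp [List.filter_cons, h1, e1]
        simp only [List.filter_cons, decide_eq_true_eq]
        rw [if_neg h1, if_pos h2, if_neg (by omega), if_neg (by omega)]
        rw [e1] at htrec ⊢
        simp only [List.nil_append, List.cons_append] at htrec ⊢
        exact congrArg (List.cons x) htrec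
      · by_cases h3 : x = 0
        · have e1 : t.filter (fun x => decide (x > 1)) = [] := by
            rw [List.filter_eq_nil_iff]; intro y hy; have := ht y hy; simp; omega
          have e2 : t.filter (fun x => decide (x = 1)) = [] := by
            rw [List.filter_eq_nil_iff]; intro y hy; have := ht y hy; simp; omega
          simp only [List.filter_cons, decide_eq_true_eq]
          rw [if_neg h1, if_neg h2, if_pos h3, if_neg (by omega)]
          rw [e1, e2] at htrec ⊢
          simp only [List.nil_append, List.cons_append] at htrec ⊢
          exact congrArg (List.cons x) htrec
        · have h4 : x < 0 := by omega
          have e1 : t.filter (fun x => decide (x > 1)) = [] := by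
            rw [List.filter_eq_nil_iff]; intro y hy; have := ht y hy; simp; omega
          have e2 : t.filter (fun x => decide (x = 1)) = [] := by
            rw [List.filter_eq_nil_iff]; intro y hy; have := ht y hy; simp; omega
          have e3 : t.filter (fun x => decide (x = 0)) = [] := by
            rw [List.filter_eq_nil_iff]; intro y hy; have := ht y hy; simp; omega
          simp only [List.filter_cons, decide_eq_true_eq]
          rw [if_neg h1, if_neg h2, if_neg h3, if_pos h4]
          rw [e1, e2, e3] at htrec ⊢
          simp only [List.nil_append, List.cons_append] at htrec ⊢
          exact congrArg (List.cons x) htrec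

lemma getD_at_len (L1 L2 : List Int) (v d : Int) : (L1 ++ v :: L2).getD L1.length d = v := by
  rw [List.getD_eq_getElem?_getD, List.getElem?_append_right (le_refl _)]
  simp

lemma headLoop_spec : ∀ (P D R a : List Int) (ans : Int),
    a = D ++ P ++ R → (∀ x ∈ P, 1 < x) → (∀ x ∈ R, x ≤ 1) →
    headLoop a ((a.length : Int) - 1) (D.length : Int) ans
      = ((D.length : Int) + 2 * ((P.length / 2 : Nat) : Int), ans + pairSum P) := by
  intro P
  induction P using pairSum.induct with
  | case1 x y t ih =>
    intro D R a ans ha hP hR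
    have hx : 1 < x := hP x (by simp)
    have hy : 1 < y := hP y (by simp)
    have hlen : a.length = D.length + (t.length + 2) + R.length := by simp [ha]; omega
    have hgx : PySem.List.pyGetD a (D.length : Int) 0 = x := by
      rw [PySem.List.pyGetD_natCast]
      rw [show a = D ++ x :: (y :: t ++ R) by simp [ha]]
      exact getD_at_len D _ x 0
    have hgy : PySem.List.pyGetD a ((D.length : Int) + 1) 0 = y := by
      rw [show ((D.length : Int) + 1) = ((D.length + 1 : Nat) : Int) by push_cast; ring,
        PySem.List.pyGetD_natCast]
      rw [show a = (D ++ [x]) ++ y :: (t ++ R) by simp [ha]]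
      have := getD_at_len (D ++ [x]) (t ++ R) y 0
      simpa using this
    rw [headLoop]
    rw [dif_pos (⟨by omega, by rw [hgy]; omega⟩ :
      (D.length : Int) + 1 ≤ (a.length : Int) - 1 ∧ PySem.List.pyGetD a ((D.length : Int) + 1) 0 > 1)]
    rw [hgx, hgy]
    have := ih (D ++ [x, y]) R a (ans + x * y) (by simp [ha]) (fun z hz => hP z (by simp [hz]))
      hR
    rw [show ((D ++ [x, y]).length : Int) = (D.length : Int) + 2 by simp] at this
    rw [this]
    simp only [Prod.mk.injEq, List.length_cons]
    refine ⟨?_, ?_⟩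
    · rw [show (t.length + 1 + 1) / 2 = t.length / 2 + 1 by omega]
      push_cast; ring
    · rw [show pairSum (x :: y :: t) = x * y + pairSum t from rfl]; ring
  | case2 P hnot =>
    intro D R a ans ha hP hR
    have hsmall : P = [] ∨ ∃ x, P = [x] := by
      match P, hnot with
      | [], _ => exact Or.inl rfl
      | [x], _ => exact Or.inr ⟨x, rfl⟩
      | x :: y :: t, hnot => exact absurd rfl (hnot x y t)
    have hguard : ¬ ((D.length : Int) + 1 ≤ (a.length : Int) - 1
        ∧ PySem.List.pyGetD a ((D.length : Int) + 1) 0 > 1) := by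
      rintro ⟨hle, hgt⟩
      rcases hsmall with h0 | ⟨x, h1⟩
      · subst h0
        rcases R with _ | ⟨r, R'⟩
        · have hlen := congrArg List.length ha
          simp at hlen
          omega
        · rcases R' with _ | ⟨r2, R''⟩
          · have hlen := congrArg List.length ha
            simp at hlen
            omega
          · have hv : PySem.List.pyGetD a ((D.length : Int) + 1) 0 ≤ 1 := by
              rw [show ((D.length : Int) + 1) = ((D.length + 1 : Nat) : Int) by push_cast; ring,
                PySem.List.pyGetD_natCast]
              rw [show a = (D ++ [r]) ++ r2 :: R'' by simp [ha]]
              have h1 := getD_at_len (D ++ [r]) R'' r2 0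
              rw [show (D ++ [r]).length = D.length + 1 by simp] at h1
              rw [h1]
              exact hR r2 (by simp)
            omega
      · subst h1
        rcases R with _ | ⟨r, R'⟩
        · have hlen := congrArg List.length ha
          simp at hlen
          omega
        · have hv : PySem.List.pyGetD a ((D.length : Int) + 1) 0 ≤ 1 := by
            rw [show ((D.length : Int) + 1) = ((D.length + 1 : Nat) : Int) by push_cast; ring,
              PySem.List.pyGetD_natCast]
            rw [show a = (D ++ [x]) ++ r :: R' by simp [ha]]
            have h1 := getD_at_len (D ++ [x]) R' r 0
            rw [show (D ++ [x]).length = D.length + 1 by simp] at h1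
            rw [h1]
            exact hR r (by simp)
          omega
    rw [headLoop, dif_neg hguard]
    rcases hsmall with h0 | ⟨x, h1⟩ <;> subst_vars <;> simp [pairSum]

lemma tailLoop_spec : ∀ (N C E a : List Int) (i ans : Int),
    a = C ++ N.reverse ++ E → (∀ x ∈ N, x < 0) → (∀ x ∈ C, 0 ≤ x) →
    0 ≤ i → i ≤ (C.length : Int) →
    tailLoop a i (((C.length + N.length : Nat) : Int) - 1) ans
      = (((C.length + N.length : Nat) : Int) - 1 - 2 * ((N.length / 2 : Nat) : Int),
         ans + pairSum N) := by
  intro N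
  induction N using pairSum.induct with
  | case1 x y t ih =>
    intro C E a i ans ha hN hC hi0 hiC
    rw [show (x :: y :: t).length = t.length + 2 by simp only [List.length_cons]]
    have harr : a = (C ++ t.reverse) ++ y :: (x :: E) := by
      simp [ha, List.reverse_cons]
    have hgy : PySem.List.pyGetD a (((C.length + (t.length + 2) : Nat) : Int) - 1 - 1) 0 = y := by
      rw [show (((C.length + (t.length + 2) : Nat) : Int) - 1 - 1)
          = ((C.length + t.length : Nat) : Int) by push_cast; ring, PySem.List.pyGetD_natCast]
      rw [harr]
      have h1 := getD_at_len (C ++ t.reverse) (x :: E) y 0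
      rw [show (C ++ t.reverse).length = C.length + t.length by simp] at h1
      exact h1
    have hgx : PySem.List.pyGetD a (((C.length + (t.length + 2) : Nat) : Int) - 1) 0 = x := by
      rw [show (((C.length + (t.length + 2) : Nat) : Int) - 1)
          = ((C.length + t.length + 1 : Nat) : Int) by push_cast; ring, PySem.List.pyGetD_natCast]
      rw [show a = (C ++ t.reverse ++ [y]) ++ x :: E by simp [harr]]
      have h1 := getD_at_len (C ++ t.reverse ++ [y]) E x 0
      rw [show (C ++ t.reverse ++ [y]).length = C.length + t.length + 1 by simp; omega] at h1
      exact h1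
    rw [tailLoop]
    rw [dif_pos (⟨by push_cast; omega, by rw [hgy]; exact hN y (by simp)⟩ :
      (((C.length + (t.length + 2) : Nat) : Int) - 1) - 1 ≥ i
        ∧ PySem.List.pyGetD a ((((C.length + (t.length + 2) : Nat) : Int) - 1) - 1) 0 < 0)]
    rw [hgx, hgy]
    have := ih C ([y, x] ++ E) a i (ans + x * y) (by simp [ha, List.reverse_cons])
      (fun z hz => hN z (by simp [hz])) hC hi0 hiC
    rw [show (((C.length + t.length : Nat) : Int) - 1)
        = (((C.length + (t.length + 2) : Nat) : Int) - 1 - 2) by push_cast; ring] at this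
    rw [this]
    simp only [Prod.mk.injEq]
    refine ⟨?_, ?_⟩
    · rw [show (t.length + 2) / 2 = t.length / 2 + 1 by omega]
      push_cast; ring
    · rw [show pairSum (x :: y :: t) = x * y + pairSum t from rfl]; ring
  | case2 N hnot =>
    intro C E a i ans ha hN hC hi0 hiC
    have hsmall : N = [] ∨ ∃ x, N = [x] := by
      match N, hnot with
      | [], _ => exact Or.inl rfl
      | [x], _ => exact Or.inr ⟨x, rfl⟩
      | x :: y :: t, hnot => exact absurd rfl (hnot x y t)
    rcases hsmall with h0 | ⟨x, h1⟩
    · subst h0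
      simp only [List.length_nil, Nat.add_zero, List.reverse_nil, List.append_nil] at ha ⊢
      rw [tailLoop, dif_neg ?_]
      · simp [pairSum]
      · rintro ⟨hge, hlt⟩
        have hC2 : 2 ≤ C.length := by omega
        obtain ⟨C', u, v, hC'⟩ : ∃ C' u v, C = C' ++ [u, v] := by
          rcases List.eq_nil_or_concat C with h | ⟨C1, v, h⟩
          · subst h; simp at hC2
          rcases List.eq_nil_or_concat C1 with h1 | ⟨C2, u, h2⟩
          · subst h; subst h1; simp at hC2
          · exact ⟨C2, u, v, by simp [h, h2]⟩
        have hv : PySem.List.pyGetD a ((C.length : Int) - 1 - 1) 0 = u := by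
          rw [show ((C.length : Int) - 1 - 1) = ((C.length - 2 : Nat) : Int) by push_cast; omega,
            PySem.List.pyGetD_natCast]
          rw [show a = C' ++ u :: ([v] ++ E) by simp [ha, hC']]
          have h1 := getD_at_len C' ([v] ++ E) u 0
          rw [show C.length - 2 = C'.length by simp [hC']]
          exact h1
        rw [hv] at hlt
        have : (0:Int) ≤ u := hC u (by simp [hC'])
        omega
    · subst h1
      simp only [List.length_cons, List.length_nil, Nat.zero_add] at *
      rw [tailLoop, dif_neg ?_]
      · simp [pairSum]
      · rintro ⟨hge, hlt⟩
        have hC1 : 1 ≤ C.length := by push_cast at hge; omega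
        rcases List.eq_nil_or_concat C with h | ⟨C1, u, h⟩
        · subst h; simp at hC1
        have hv : PySem.List.pyGetD a (((C.length + 1 : Nat) : Int) - 1 - 1) 0 = u := by
          rw [show (((C.length + 1 : Nat) : Int) - 1 - 1) = ((C.length - 1 : Nat) : Int) by
            push_cast; omega, PySem.List.pyGetD_natCast]
          rw [show a = C1 ++ u :: ([x] ++ E) by simp [ha, h]]
          have h1 := getD_at_len C1 ([x] ++ E) u 0
          rw [show C.length - 1 = C1.length by simp [h]]
          exact h1
        rw [hv] at hlt
        have : (0:Int) ≤ u := hC u (by simp [h])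
        omega

-- ===== VERDICT =====
theorem solution_spec : Claim_equal_solution := by
  unfold Claim_equal_solution
  intro n arr _
  unfold Spec_solution solution solution_alt
  dsimp only
  rw [buckets_eq]
  dsimp only
  set s := PySem.List.sorted arr (fun x => x) true with hsdef
  have hs : s.Pairwise (fun a b => b ≤ a) := PySem.List.sorted_pairwise_rev arr (fun x => x)
  simp only [List.nil_append]
  set P := s.filter (fun x => decide (x > 1)) with hPdef
  set O := s.filter (fun x => decide (x = 1)) with hOdef
  set Z := s.filter (fun x => decide (x = 0)) with hZdef
  set M := s.filter (fun x => decide (x < 0)) with hMdef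
  have hsplit : s = P ++ O ++ Z ++ M := sorted_split s hs
  have hmemP : ∀ x ∈ P, 1 < x := by
    intro x hx; have := List.of_mem_filter hx; simpa using this
  have hmemO : ∀ x ∈ O, x = 1 := by
    intro x hx; have := List.of_mem_filter hx; simpa using this
  have hmemZ : ∀ x ∈ Z, x = 0 := by
    intro x hx; have := List.of_mem_filter hx; simpa using this
  have hmemM : ∀ x ∈ M, x < 0 := by
    intro x hx; have := List.of_mem_filter hx; simpa using this
  have hRle : ∀ x ∈ O ++ Z ++ M, x ≤ 1 := by
    intro x hx
    rcases List.mem_append.1 hx with h | h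
    · rcases List.mem_append.1 h with h' | h'
      · have := hmemO x h'; omega
      · have := hmemZ x h'; omega
    · have := hmemM x h; omega
  have hCge : ∀ x ∈ P ++ O ++ Z, 0 ≤ x := by
    intro x hx
    rcases List.mem_append.1 hx with h | h
    · rcases List.mem_append.1 h with h' | h'
      · have := hmemP x h'; omega
      · have := hmemO x h'; omega
    · have := hmemZ x h; omega
  have hslen : s.length = P.length + O.length + Z.length + M.length := by
    conv_lhs => rw [hsplit]
    simp
    omega
  -- the minus copy A sorts ascending is M reversed
  have hM : M.Pairwise (fun a b => b ≤ a) := List.Pairwise.filter _ hs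
  have hMrev : PySem.List.sorted M (fun x => x) false = M.reverse :=
    PySem.List.sorted_id_eq_of_perm_of_pairwise M M.reverse (List.reverse_perm M)
      (List.pairwise_reverse.2 hM)
  rw [hMrev]
  -- A's plus part
  have hplusA : (if P.length % 2 = 0 then
        (PySem.List.pyRange 0 (P.length : Int) 2).foldl
          (fun a i => a + PySem.List.pyGetD P i 0 * PySem.List.pyGetD P (i + 1) 0) 0
      else
        (PySem.List.pyRange 0 ((P.length : Int) - 1) 2).foldl
          (fun a i => a + PySem.List.pyGetD P i 0 * PySem.List.pyGetD P (i + 1) 0) 0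
          + PySem.List.pyGetD P (-1) 0)
      = pairSum P + oddTail P := by
    by_cases hp : P.length % 2 = 0
    · rw [if_pos hp, A_loop_even P 0 hp]
      unfold oddTail
      rw [if_neg (by omega)]
      ring
    · rw [if_neg hp, A_loop_odd P 0 (by omega)]
      have hne : P ≠ [] := by
        intro h; rw [h] at hp; simp at hp
      rw [PySem.List.pyGetD_neg_one P 0 hne]
      unfold oddTail
      rw [if_pos (by omega)]
      rw [List.getLastD_eq_getLast?, List.getLast?_eq_some_getLast hne]
      show 0 + pairSum P + P.getLast hne = pairSum P + P.getLast hne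
      ring
  rw [hplusA]
  -- B's head loop
  have hhead : headLoop s ((s.length : Int) - 1) 0 0
      = (2 * ((P.length / 2 : Nat) : Int), pairSum P) := by
    have := headLoop_spec P [] (O ++ Z ++ M) s 0 (by rw [hsplit]; simp) hmemP hRle
    simpa using this
  rw [hhead]
  dsimp only
  -- B's lone >1 element step
  have hlone : (if 2 * ((P.length / 2 : Nat) : Int) ≤ (s.length : Int) - 1
        ∧ PySem.List.pyGetD s (2 * ((P.length / 2 : Nat) : Int)) 0 > 1 then
        (2 * ((P.length / 2 : Nat) : Int) + 1,
         pairSum P + PySem.List.pyGetD s (2 * ((P.length / 2 : Nat) : Int)) 0)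
      else (2 * ((P.length / 2 : Nat) : Int), pairSum P))
      = ((P.length : Int), pairSum P + oddTail P) := by
    by_cases hp : P.length % 2 = 0
    · rw [if_neg ?_]
      · unfold oddTail
        rw [if_neg (by omega)]
        simp only [Prod.mk.injEq]
        constructor
        · omega
        · ring
      · rintro ⟨hle, hgt⟩
        rcases hrest : O ++ Z ++ M with _ | ⟨r, R'⟩
        · have h0 := congrArg List.length hrest
          simp only [List.length_append, List.length_nil] at h0
          omega
        · have hv : PySem.List.pyGetD s (2 * ((P.length / 2 : Nat) : Int)) 0 = r := by
            rw [show (2 * ((P.length / 2 : Nat) : Int)) = ((P.length : Nat) : Int) by omega,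
              PySem.List.pyGetD_natCast]
            rw [show s = P ++ r :: R' by
              rw [hsplit]; simp only [List.append_assoc]; rw [← List.append_assoc O Z M, hrest]]
            exact getD_at_len P R' r 0
          rw [hv] at hgt
          have : r ≤ 1 := hRle r (by simp [hrest])
          omega
    · have hne : P ≠ [] := by intro h; rw [h] at hp; simp at hp
      obtain ⟨P', p, hP'⟩ := List.eq_nil_or_concat P |>.resolve_left hne
      rw [if_pos ?_]
      · unfold oddTail
        rw [if_pos (by omega)]
        have hv : PySem.List.pyGetD s (2 * ((P.length / 2 : Nat) : Int)) 0 = p := by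
          rw [show (2 * ((P.length / 2 : Nat) : Int)) = ((P.length - 1 : Nat) : Int) by push_cast; omega,
            PySem.List.pyGetD_natCast]
          rw [show s = P' ++ p :: (O ++ Z ++ M) by rw [hsplit, hP']; simp]
          have h1 := getD_at_len P' (O ++ Z ++ M) p 0
          rw [show P.length - 1 = P'.length by simp [hP']]
          exact h1
        rw [hv]
        simp only [Prod.mk.injEq]
        constructor
        · omega
        · rw [show P.getLastD 0 = p by rw [hP']; simp]
      · constructor
        · have : P.length ≤ s.length := by omega
          omega
        · have hv : PySem.List.pyGetD s (2 * ((P.length / 2 : Nat) : Int)) 0 = p := by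
            rw [show (2 * ((P.length / 2 : Nat) : Int)) = ((P.length - 1 : Nat) : Int) by push_cast; omega,
              PySem.List.pyGetD_natCast]
            rw [show s = P' ++ p :: (O ++ Z ++ M) by rw [hsplit, hP']; simp]
            have h1 := getD_at_len P' (O ++ Z ++ M) p 0
            rw [show P.length - 1 = P'.length by simp [hP']]
            exact h1
          rw [hv]
          exact hmemP p (by simp [hP'])
  rw [hlone]
  dsimp only
  -- B's tail loop
  have htail : tailLoop s ((P.length : Int)) ((s.length : Int) - 1) (pairSum P + oddTail P)
      = ((s.length : Int) - 1 - 2 * ((M.length / 2 : Nat) : Int),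
         pairSum P + oddTail P + pairSum M.reverse) := by
    have := tailLoop_spec M.reverse (P ++ O ++ Z) [] s ((P.length : Int)) (pairSum P + oddTail P)
      (by rw [List.reverse_reverse, List.append_nil]; conv_lhs => rw [hsplit])
      (by intro x hx; exact hmemM x (List.mem_reverse.1 hx)) hCge
      (Int.natCast_nonneg _) (by simp; omega)
    rw [show ((P ++ O ++ Z).length + M.reverse.length : Nat) = s.length by simp [hslen]; omega] at this
    rw [show (M.reverse.length / 2 : Nat) = (M.length / 2 : Nat) by simp] at this
    exact this
  rw [htail]
  dsimp only
  -- the middle slice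
  have hsplit2 : s = P ++ (O ++ Z ++ M) := by rw [hsplit]; simp
  have hmid : PySem.List.slice s (some ((P.length : Int)))
        (some ((s.length : Int) - 1 - 2 * ((M.length / 2 : Nat) : Int) + 1))
      = O ++ Z ++ M.take (M.length % 2) := by
    rw [show ((s.length : Int) - 1 - 2 * ((M.length / 2 : Nat) : Int) + 1)
        = ((P.length + (O.length + Z.length + M.length % 2) : Nat) : Int) by push_cast; omega]
    rw [show ((P.length + (O.length + Z.length + M.length % 2) : Nat) : Int)
        = ((P.length : Nat) : Int) + ((O.length + Z.length + M.length % 2 : Nat) : Int) by push_cast; ring]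
    rw [PySem.List.slice_natCast_add]
    rw [show s.drop P.length = O ++ Z ++ M by conv_lhs => rw [hsplit2]; rw [List.drop_left]]
    rw [show O.length + Z.length + M.length % 2 = (O ++ Z).length + M.length % 2 by simp]
    rw [List.take_length_add_append]
  rw [hmid]
  -- the count of ones in the middle
  have hcount : PySem.List.count (O ++ Z ++ M.take (M.length % 2)) 1 = O.length := by
    rw [PySem.List.count_eq]
    rw [List.count_append, List.count_append]
    have h1 : O.count 1 = O.length := List.count_eq_length.2 (by
      intro b hb; have := hmemO b hb; simp [this])
    have h2 : Z.count 1 = 0 := List.count_eq_zero.2 (by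
      intro h; have := hmemZ 1 h; omega)
    have h3 : (M.take (M.length % 2)).count 1 = 0 := List.count_eq_zero.2 (by
      intro h; have := hmemM 1 (List.mem_of_mem_take h); omega)
    omega
  rw [hcount]
  by_cases hpar : M.length % 2 = 0
  · -- no leftover negative
    rw [if_pos (by simp [hpar])]
    rw [A_loop_even M.reverse _ (by simp [hpar])]
    rw [if_neg ?_]
    · ring
    · rintro ⟨hne, hlt, _⟩
      rw [hpar, List.take_zero, List.append_nil] at hne hlt
      rw [PySem.List.pyGetD_neg_one (O ++ Z) 0 hne] at hlt
      have hmem := List.getLast_mem hne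
      rcases List.mem_append.1 hmem with h | h
      · have := hmemO _ h; omega
      · have := hmemZ _ h; omega
  · -- one leftover negative: the most positive one, M.head
    have hpar1 : M.length % 2 = 1 := by omega
    have hMne : M ≠ [] := by intro h; rw [h] at hpar1; simp at hpar1
    obtain ⟨m, M', hM'⟩ := List.exists_cons_of_ne_nil hMne
    have htake : M.take (M.length % 2) = [m] := by rw [hpar1, hM']; simp
    rw [htake]
    have hm : m < 0 := hmemM m (by rw [hM']; simp)
    have hlastA : PySem.List.pyGetD M.reverse (-1) 0 = m := by
      rw [hM', List.reverse_cons, PySem.List.pyGetD_neg_one_append_singleton]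
    have hlastB : PySem.List.pyGetD (O ++ Z ++ [m]) (-1) 0 = m :=
      PySem.List.pyGetD_neg_one_append_singleton _ _ _
    have h0O : (0 : Int) ∉ O := by intro h; have := hmemO 0 h; omega
    rw [if_neg (by simp [hpar1])]
    rw [A_loop_odd M.reverse _ (by simp [hpar1])]
    rw [hlastA]
    by_cases hz : Z.length = 0
    · have hZnil : Z = [] := List.length_eq_zero_iff.1 hz
      rw [if_pos hz]
      rw [if_pos ?_]
      · rw [hlastB]; ring
      · refine ⟨by simp, by rw [hlastB]; exact hm, ?_⟩
        rw [hZnil]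
        simp only [List.append_nil, List.mem_append, List.mem_singleton]
        rintro (h | h)
        · exact h0O h
        · omega
    · have hZne : Z ≠ [] := by intro h; rw [h] at hz; simp at hz
      rw [if_neg hz]
      rw [if_neg ?_]
      · ring
      · rintro ⟨_, _, h0⟩
        exact h0 (by
          obtain ⟨z, Z', hZ'⟩ := List.exists_cons_of_ne_nil hZne
          have : z = 0 := hmemZ z (by rw [hZ']; simp)
          rw [hZ', ← this]
          simp)
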